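-- pv_equiv track=rewrite | github.com/KayckCarvalho/exercicios-algoritmos | homework_aula_02/caso01.py | registrar_presencas
-- ===== SOURCE A (Python) =====
-- def registrar_presencas(presencas_semana):
--     todos_alunos = set()
--     for dia in presencas_semana:
--         todos_alunos.update(presencas_semana[dia])
--     presentes_todos_dias = set(presencas_semana[list(presencas_semana.keys())[0]])
--     for dia in presencas_semana.values():
--         presentes_todos_dias.intersection_update(dia)
--     faltaram_ao_menos_um_dia = todos_alunos - presentes_todos_dias
--     total_presencas = {aluno: 0 for aluno in todos_alunos}
--     for dia in presencas_semana.values():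
--         for aluno in dia:
--             total_presencas[aluno] += 1
--
--     return presentes_todos_dias, faltaram_ao_menos_um_dia, total_presencas
-- ===== SOURCE B (Python) =====
-- def registrar_presencas(presencas_semana):
--     # Membership-predicate formulation: one flattened counting pass builds the
--     # totals; "present every day" is a predicate tested per student, replacing
--     # A's iterative set intersection, union loop and set subtraction.
--     dias = list(presencas_semana.values())
--     total_presencas = {}
--     for aluno in (a for dia in dias for a in dia):
--         total_presencas[aluno] = total_presencas.get(aluno, 0) + 1
--
--     def sempre_presente(aluno):
--         return all(aluno in dia for dia in dias)
--
--     primeiro = set(presencas_semana[list(presencas_semana)[0]])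
--     presentes_todos_dias = {a for a in primeiro if sempre_presente(a)}
--     faltaram_ao_menos_um_dia = {a for a in total_presencas if not sempre_presente(a)}
--     return presentes_todos_dias, faltaram_ao_menos_um_dia, total_presencas
-- ===== Notes on version B (the rewrite author's own statement) =====
-- stated objective: alternative
-- what changed: B replaces A's four set-algebra passes (union loop, iterative intersection, set subtraction, zero-init-then-bump counting) by one counting pass over the flattened occurrences plus a per-student 'present every day' membership predicate that classifies students by filtering.
import Mathlib
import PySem

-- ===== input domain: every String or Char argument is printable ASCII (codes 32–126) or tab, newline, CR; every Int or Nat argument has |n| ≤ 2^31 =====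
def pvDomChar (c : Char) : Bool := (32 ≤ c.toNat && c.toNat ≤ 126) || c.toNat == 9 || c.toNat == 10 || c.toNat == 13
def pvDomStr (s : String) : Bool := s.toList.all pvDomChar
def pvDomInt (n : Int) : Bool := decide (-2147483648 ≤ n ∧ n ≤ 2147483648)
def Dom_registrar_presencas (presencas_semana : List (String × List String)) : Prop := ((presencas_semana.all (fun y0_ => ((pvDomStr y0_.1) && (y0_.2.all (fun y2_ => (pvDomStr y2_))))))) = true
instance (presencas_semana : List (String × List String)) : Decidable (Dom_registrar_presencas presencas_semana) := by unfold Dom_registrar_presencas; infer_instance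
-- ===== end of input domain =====

-- B replaces A's set algebra (union loop, iterative intersection, set subtraction,
-- zero-init-then-bump counting) by one counting pass over the flattened occurrence
-- list plus a per-student "present every day" membership predicate; return values agree
-- on all non-empty inputs (both raise IndexError on an empty dict).

-- ===== PORT A =====
-- Literal port of A. The `[] => ([],[],[])` branch is dead code: Python raises
-- IndexError at `list(presencas_semana.keys())[0]` there, and Pre_ excludes it.
-- `total_presencas[aluno] += 1` is ported as getD+insert: its key is always present
-- (every aluno of every dia was seeded into total_presencas), so no KeyError arises.
def registrar_presencas (presencas_semana : List (String × List String)) : List String × List String × (List (String × Int)) :=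
  let d := PySem.Dict.ofList presencas_semana
  -- todos_alunos = set(); for dia in presencas_semana: todos_alunos.update(presencas_semana[dia])
  let todos_alunos : PySem.Set String :=
    d.keys.foldl (fun acc dia => PySem.Set.update acc (d.getD dia [])) PySem.Set.empty
  match d.keys with
  | [] => ([], [], [])
  | k0 :: _ =>
    -- presentes_todos_dias = set(presencas_semana[list(presencas_semana.keys())[0]]); loop intersection_update
    let presentes_todos_dias : PySem.Set String :=
      d.values.foldl (fun acc dia => PySem.Set.inter acc dia) (PySem.Set.ofList (d.getD k0 []))
    let faltaram_ao_menos_um_dia : PySem.Set String :=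
      PySem.Set.diff todos_alunos presentes_todos_dias
    -- total_presencas = {aluno: 0 for aluno in todos_alunos}
    let tot0 : PySem.Dict String Int :=
      todos_alunos.foldl (fun t aluno => t.insert aluno 0) PySem.Dict.empty
    -- for dia in values: for aluno in dia: total_presencas[aluno] += 1
    let total_presencas : PySem.Dict String Int :=
      d.values.foldl (fun t dia => dia.foldl (fun t aluno => t.insert aluno (t.getD aluno 0 + 1)) t) tot0
    (presentes_todos_dias, faltaram_ao_menos_um_dia, total_presencas.items)

-- ===== PORT B =====
-- Literal port of Source B: counting pass over the flattened occurrences,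
-- then the `sempre_presente` predicate filters the first day's set (presentes) and
-- the counter's keys (faltaram). Set comprehensions are ported as filters: their
-- results are sets, so Python's iteration order cannot influence the value.
def registrar_presencas_alt (presencas_semana : List (String × List String)) : List String × List String × (List (String × Int)) :=
  let d := PySem.Dict.ofList presencas_semana
  let dias := d.values
  -- total_presencas = {}; for aluno in (a for dia in dias for a in dia): total_presencas[aluno] = total_presencas.get(aluno, 0) + 1
  let total_presencas : PySem.Dict String Int :=
    dias.flatten.foldl (fun t aluno => t.insert aluno (t.getD aluno 0 + 1)) PySem.Dict.empty
  match d.keys with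
  | [] => ([], [], [])
  | k0 :: _ =>
    -- def sempre_presente(aluno): return all(aluno in dia for dia in dias)
    let sempre_presente : String → Bool := fun aluno => dias.all (fun dia => dia.contains aluno)
    -- primeiro = set(presencas_semana[list(presencas_semana)[0]])
    let primeiro : PySem.Set String := PySem.Set.ofList (d.getD k0 [])
    -- presentes_todos_dias = {a for a in primeiro if sempre_presente(a)}
    let presentes_todos_dias : PySem.Set String := primeiro.filter sempre_presente
    -- faltaram_ao_menos_um_dia = {a for a in total_presencas if not sempre_presente(a)}
    let faltaram_ao_menos_um_dia : PySem.Set String :=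
      total_presencas.keys.filter (fun a => ! sempre_presente a)
    (presentes_todos_dias, faltaram_ao_menos_um_dia, total_presencas.items)

-- ===== PRECONDITION & SPEC =====
-- Pre_ excludes only the empty dict, where A raises IndexError (and so does B).
def Pre_registrar_presencas (presencas_semana : List (String × List String)) : Prop :=
  presencas_semana ≠ []
instance (presencas_semana : List (String × List String)) : Decidable (Pre_registrar_presencas presencas_semana) := by unfold Pre_registrar_presencas; infer_instance
def pvWitness_registrar_presencas : (List (String × List String)) := [("seg", ["ana", "bia"]), ("ter", ["ana"])]

def Spec_registrar_presencas (presencas_semana : List (String × List String)) (out : List String × List String × (List (String × Int))) : Prop := out = registrar_presencas_alt presencas_semana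
instance (presencas_semana : List (String × List String)) (out : List String × List String × (List (String × Int))) : Decidable (Spec_registrar_presencas presencas_semana out) := by unfold Spec_registrar_presencas; infer_instance

-- ===== CLAIM (what is proved, stated in full; the proofs are below) =====
def Claim_equal_registrar_presencas : Prop := ∀ (presencas_semana : List (String × List String)), Dom_registrar_presencas presencas_semana → Pre_registrar_presencas presencas_semana → Spec_registrar_presencas presencas_semana (registrar_presencas presencas_semana)

-- ===== LEMMAS AND PROOFS =====

-- folding intersection over a list of day-lists = filtering the seed by
-- membership in every day (the key bridge from A's loop to B's predicate)
theorem pv_foldl_inter (vals : List (List String)) (s : PySem.Set String) :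
    vals.foldl (fun acc dia => PySem.Set.inter acc dia) s
      = s.filter (fun a => vals.all (fun dia => dia.contains a)) := by
  induction vals generalizing s with
  | nil => simp
  | cons v vs ih =>
    rw [List.foldl_cons, ih]
    show (PySem.Set.inter s v).filter _ = _
    simp [PySem.Set.inter, List.filter_filter, Bool.and_comm]

-- folding set.update over a list of lists = building the set of the flattened list
theorem pv_foldl_update (vals : List (List String)) (s : PySem.Set String) :
    vals.foldl (fun s dia => PySem.Set.update s dia) s = vals.flatten.foldl PySem.Set.add s := by
  rw [List.foldl_flatten]; rfl

-- A's union loop over keys (with lookup) is the union loop over the values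
theorem pv_todos_eq (d : PySem.Dict String (List String)) (h : d.keys.Nodup) :
    d.keys.foldl (fun acc dia => PySem.Set.update acc (d.getD dia [])) PySem.Set.empty
      = d.values.foldl (fun acc dia => PySem.Set.update acc dia) PySem.Set.empty := by
  show (d.items.map (·.1)).foldl _ _ = (d.items.map (·.2)).foldl _ _
  rw [List.foldl_map, List.foldl_map]
  refine PySem.List.foldl_congr_mem _ _ _ _ (fun acc p hp => ?_)
  rw [PySem.Dict.getD_of_mem_items _ hp h]

-- counting over l into a dict d that already contains every element of l
-- bumps each entry by its number of occurrences (and adds no key)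
theorem pv_items_preseeded (l : List String) (d : PySem.Dict String Int)
    (hnd : d.keys.Nodup) (hc : ∀ a ∈ l, d.contains a = true) :
    (l.foldl (fun t aluno => t.insert aluno (t.getD aluno 0 + 1)) d).items
      = d.items.map (fun p => (p.1, p.2 + (l.count p.1 : Int))) := by
  induction l generalizing d with
  | nil => simp
  | cons a l ih =>
    have hca : d.contains a = true := hc a (by simp)
    have hnd' : (d.insert a (d.getD a 0 + 1)).keys.Nodup := by
      rw [PySem.Dict.keys_insert_of_contains _ _ hca]; exact hnd
    have hc' : ∀ b ∈ l, (d.insert a (d.getD a 0 + 1)).contains b = true := by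
      intro b hb
      rw [PySem.Dict.contains_insert]
      simp [hc b (by simp [hb])]
    rw [List.foldl_cons, ih _ hnd' hc',
        PySem.Dict.items_insert_of_contains _ _ hca, List.map_map]
    refine List.map_congr_left (fun p hp => ?_)
    obtain ⟨p1, p2⟩ := p
    by_cases hpa : p1 = a
    · subst hpa
      have hg : d.getD p1 0 = p2 := PySem.Dict.getD_of_mem_items d hp hnd 0
      simp [Function.comp, hg]
      ring
    · have hba : (p1 == a) = false := by simp [hpa]
      simp [Function.comp, hba, Ne.symm hpa]

-- ===== VERDICT (by name: the statement is the Claim_ definition above) =====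
theorem registrar_presencas_spec : Claim_equal_registrar_presencas := by
  intro ps _ _
  unfold Spec_registrar_presencas registrar_presencas registrar_presencas_alt
  set d := PySem.Dict.ofList ps with hd
  have hnd : d.keys.Nodup := PySem.Dict.nodup_keys_ofList ps
  cases hk : d.keys with
  | nil => simp only [hk]
  | cons k0 rest =>
    -- the first value is d.getD k0 [] and it is a member of d.values
    have hv0 : d.getD k0 [] ∈ d.values := by
      have hitems : ∃ v rest', d.items = (k0, v) :: rest' := by
        cases hi : d.items with
        | nil => rw [PySem.Dict.keys, hi] at hk; simp at hk
        | cons p rest' =>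
          refine ⟨p.2, rest', ?_⟩
          rw [PySem.Dict.keys, hi] at hk
          simp at hk
          obtain ⟨h1, h2⟩ := hk
          rw [← h1]
      obtain ⟨v, rest', hi⟩ := hitems
      have hgv : d.getD k0 [] = v :=
        PySem.Dict.getD_of_mem_items d (by rw [hi]; exact List.mem_cons_self ..) hnd []
      rw [hgv, PySem.Dict.values, hi]
      simp
    set sempre : String → Bool := fun a => d.values.all (fun dia => dia.contains a) with hsempre
    set presentes := (PySem.Set.ofList (d.getD k0 [])).filter sempre with hpdef
    -- membership in presentes ↔ sempre
    have hpmem : ∀ a : String, PySem.Set.contains presentes a = sempre a := by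
      intro a
      rcases hs : sempre a with _ | _
      · simp only [PySem.Set.contains_eq_listContains, hpdef, List.contains_eq_mem,
          decide_eq_false_iff_not]
        intro hmem
        have := List.of_mem_filter hmem
        rw [hs] at this; exact absurd this (by simp)
      · simp only [PySem.Set.contains_eq_listContains, hpdef, List.contains_eq_mem,
          decide_eq_true_eq]
        refine List.mem_filter.mpr ⟨?_, hs⟩
        rw [PySem.Set.mem_ofList]
        have hall := hs
        rw [hsempre] at hall
        simp only [List.all_eq_true] at hall
        have := hall _ hv0
        simpa using this
    -- presentes: A's intersection fold = B's filter of the first set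
    have hpres :
        d.values.foldl (fun acc dia => PySem.Set.inter acc dia) (PySem.Set.ofList (d.getD k0 []))
          = presentes := by
      rw [pv_foldl_inter]
    -- todos = set of the flattened values
    have htodos :
        d.keys.foldl (fun acc dia => PySem.Set.update acc (d.getD dia [])) PySem.Set.empty
          = PySem.Set.ofList d.values.flatten := by
      rw [pv_todos_eq d hnd, pv_foldl_update]; rfl
    set todos := PySem.Set.ofList d.values.flatten with htdef
    have hndt : (todos : List String).Nodup := PySem.Set.nodup_ofList _
    -- faltaram: A's set difference = B's filter of the counter's keys
    have hfalt :
        PySem.Set.diff todos presentes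
          = (PySem.Dict.counter d.values.flatten : PySem.Dict String Int).keys.filter
              (fun a => ! sempre a) := by
      rw [PySem.Dict.keys_counter]
      show todos.filter _ = todos.filter _
      refine List.filter_congr (fun a _ => ?_)
      rw [hpmem a]
    -- A's zero-seeded dict over todos
    have htot0keys :
        ((todos : List String).foldl (fun t a => t.insert a (0 : Int)) PySem.Dict.empty).keys
          = todos := by
      rw [PySem.Dict.keys_foldl_insert]
      show PySem.Set.update PySem.Set.empty todos = todos
      calc PySem.Set.update PySem.Set.empty todos
          = PySem.Set.ofList todos := PySem.Set.update_nil_left todos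
        _ = todos := PySem.Set.ofList_eq_self_of_nodup todos hndt
    have htot0items :
        ((todos : List String).foldl (fun t a => t.insert a (0 : Int)) PySem.Dict.empty).items
          = (todos : List String).map (fun a => (a, (0 : Int))) := by
      refine PySem.Dict.items_foldl_insert_fresh _ _ _ _ ?_ ?_
      · intro a _; exact PySem.Dict.contains_empty a
      · simpa using hndt
    -- A's totals = B's counter, item for item
    have htot :
        (d.values.foldl (fun t dia => dia.foldl (fun t a => t.insert a (t.getD a 0 + 1)) t)
            ((todos : List String).foldl (fun t a => t.insert a (0 : Int)) PySem.Dict.empty)).items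
          = (PySem.Dict.counter d.values.flatten : PySem.Dict String Int).items := by
      rw [← List.foldl_flatten]
      rw [pv_items_preseeded _ _ (by rw [htot0keys]; exact hndt)
            (fun a ha => by
              rw [PySem.Dict.contains_iff_mem_keys, htot0keys, htdef, PySem.Set.mem_ofList]
              exact ha)]
      rw [htot0items, PySem.Dict.items_counter, List.map_map, htdef]
      simp
    -- assemble
    rw [hk] at htodos
    simp only [hk]
    rw [hpres, htodos, hfalt, htot, PySem.Dict.foldl_insert_getD_add_one_eq_counter]
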